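-- pv_equiv track=rewrite | github.com/tahentx/gridshift | metis.py | create_divisors_dict
-- ===== SOURCE A (Python) =====
-- def create_divisors_dict(divisors,lower,upper):
--     d = dict((x,[]) for x in divisors)
--
--     span = range(lower,upper + 1)
--     for x in span:
--         for key in d.keys():
--             if x % key == 0:
--                 d[key].append(x)
--     return d
-- ===== SOURCE B (Python) =====
-- def create_divisors_dict(divisors, lower, upper):
--     result = {}
--     for k in divisors:
--         if k not in result:
--             s = abs(k)
--             start = -(-lower // s) * s
--             result[k] = list(range(start, upper + 1, s))
--     return result
-- ===== Notes on version B (the rewrite author's own statement) =====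
-- stated objective: faster
-- what changed: Instead of scanning every integer in [lower, upper] and testing it against every divisor, B generates each divisor's multiples directly with an arithmetic range (first multiple >= lower, stepping by |divisor|).
-- outside the precondition, e.g. on create_divisors_dict([0], 1, 0): A returns {0: []}, B raises ZeroDivisionError
import Mathlib
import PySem

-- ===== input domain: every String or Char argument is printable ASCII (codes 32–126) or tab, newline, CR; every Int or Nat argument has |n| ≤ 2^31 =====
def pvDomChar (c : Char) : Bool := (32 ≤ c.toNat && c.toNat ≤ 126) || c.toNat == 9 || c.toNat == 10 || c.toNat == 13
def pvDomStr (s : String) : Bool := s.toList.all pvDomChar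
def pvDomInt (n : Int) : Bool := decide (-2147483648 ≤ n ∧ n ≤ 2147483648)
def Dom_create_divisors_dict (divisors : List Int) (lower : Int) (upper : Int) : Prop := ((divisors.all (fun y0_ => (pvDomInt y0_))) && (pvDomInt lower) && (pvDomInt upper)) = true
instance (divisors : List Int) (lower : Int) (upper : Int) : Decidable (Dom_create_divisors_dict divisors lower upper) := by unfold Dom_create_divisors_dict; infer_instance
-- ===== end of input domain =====

-- B replaces A's scan of every integer in [lower, upper] against every divisor by generating
-- each divisor's multiples directly with an arithmetic range (objective: faster, asymptotically).


-- ===== PORT A =====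
def create_divisors_dict (divisors : List Int) (lower : Int) (upper : Int) : List (Int × List Int) :=
  -- d = dict((x, []) for x in divisors)
  let d : PySem.Dict Int (List Int) :=
    divisors.foldl (fun d x => d.insert x ([] : List Int)) PySem.Dict.empty
  -- span = range(lower, upper + 1)
  let span := PySem.List.pyRange lower (upper + 1) 1
  -- for x in span: for key in d.keys(): if x % key == 0: d[key].append(x)
  let d := span.foldl (fun d x =>
    (PySem.Dict.keys d).foldl (fun d key =>
      if PySem.Int.mod x key = 0 then d.modify key [] (fun v => v ++ [x]) else d) d) d
  d.items

-- ===== PORT B =====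
def create_divisors_dict_alt (divisors : List Int) (lower : Int) (upper : Int) : List (Int × List Int) :=
  (divisors.foldl (fun res k =>
      if res.contains k = false then
        -- s = abs(k); start = -(-lower // s) * s; result[k] = list(range(start, upper + 1, s))
        res.insert k (PySem.List.pyRange (-(PySem.Int.floordiv (-lower) |k|) * |k|) (upper + 1) |k|)
      else res)
    (PySem.Dict.empty : PySem.Dict Int (List Int))).items

-- ===== PRECONDITION & SPEC =====
-- Pre_ excludes a divisor 0: A raises ZeroDivisionError on 'x % 0' whenever the range is nonempty,
-- and the empty-list entry it returns for 0 when lower > upper is an accident of the dead loop; B raises on '// 0' there.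
def Pre_create_divisors_dict (divisors : List Int) (lower : Int) (upper : Int) : Prop :=
  0 ∉ divisors
instance (divisors : List Int) (lower : Int) (upper : Int) : Decidable (Pre_create_divisors_dict divisors lower upper) := by unfold Pre_create_divisors_dict; infer_instance
def pvWitness_create_divisors_dict : List Int × Int × Int := ([2, 3, -4], 1, 12)

def Spec_create_divisors_dict (divisors : List Int) (lower : Int) (upper : Int) (out : List (Int × List Int)) : Prop := out = create_divisors_dict_alt divisors lower upper
instance (divisors : List Int) (lower : Int) (upper : Int) (out : List (Int × List Int)) : Decidable (Spec_create_divisors_dict divisors lower upper out) := by unfold Spec_create_divisors_dict; infer_instance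

-- ===== CLAIM (what is proved, stated in full; the proofs are below) =====
def Claim_equal_create_divisors_dict : Prop := ∀ (divisors : List Int) (lower : Int) (upper : Int), Dom_create_divisors_dict divisors lower upper → Pre_create_divisors_dict divisors lower upper → Spec_create_divisors_dict divisors lower upper (create_divisors_dict divisors lower upper)

-- ===== LEMMAS AND PROOFS =====

-- the value list B builds for key k
def pvRangeOf (lower upper k : Int) : List Int :=
  PySem.List.pyRange (-(PySem.Int.floordiv (-lower) |k|) * |k|) (upper + 1) |k|

-- A's initial dict: every stored value is []
lemma pvInit_getD (divs : List Int) (d : PySem.Dict Int (List Int))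
    (h : ∀ k, d.getD k [] = []) (k : Int) :
    ((divs.foldl (fun d x => d.insert x ([] : List Int)) d).getD k []) = [] := by
  induction divs generalizing d with
  | nil => exact h k
  | cons a t ih =>
      simp only [List.foldl_cons]
      exact ih _ (fun k' => by rw [PySem.Dict.getD_insert]; split <;> simp [h])

-- A's inner loop: keys are preserved
lemma pvInner_keys (x : Int) (L : List Int) (d : PySem.Dict Int (List Int))
    (h : ∀ key ∈ L, d.contains key = true) :
    (L.foldl (fun d key => if PySem.Int.mod x key = 0 then d.modify key [] (fun v => v ++ [x]) else d) d).keys = d.keys := by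
  induction L generalizing d with
  | nil => rfl
  | cons a t ih =>
      simp only [List.foldl_cons]
      have hka : d.contains a = true := h a (by simp)
      by_cases hm : PySem.Int.mod x a = 0
      · rw [if_pos hm]
        have hk : (d.modify a [] (fun v => v ++ [x])).keys = d.keys := by
          rw [PySem.Dict.keys_modify, PySem.Dict.keys_insert_of_contains _ _ hka]
        rw [ih _ (fun key hk' => by
          rw [PySem.Dict.contains_iff_mem_keys, hk, ← PySem.Dict.contains_iff_mem_keys]
          exact h key (by simp [hk']))]
        exact hk
      · rw [if_neg hm]
        exact ih _ (fun key hk' => h key (by simp [hk']))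

-- A's inner loop: the value at k
lemma pvInner_getD (x : Int) (L : List Int) (d : PySem.Dict Int (List Int))
    (hnd : L.Nodup) (h : ∀ key ∈ L, d.contains key = true) (k : Int) :
    (L.foldl (fun d key => if PySem.Int.mod x key = 0 then d.modify key [] (fun v => v ++ [x]) else d) d).getD k [] =
      if k ∈ L ∧ PySem.Int.mod x k = 0 then d.getD k [] ++ [x] else d.getD k [] := by
  induction L generalizing d with
  | nil => simp
  | cons a t ih =>
      simp only [List.foldl_cons]
      have hka : d.contains a = true := h a (by simp)
      have hnd' : t.Nodup := hnd.of_cons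
      have hanot : a ∉ t := by
        have := List.nodup_cons.mp hnd; exact this.1
      by_cases hm : PySem.Int.mod x a = 0
      · rw [if_pos hm]
        have hcont : ∀ key ∈ t, (d.modify a [] (fun v => v ++ [x])).contains key = true := by
          intro key hk'
          rw [PySem.Dict.contains_iff_mem_keys, PySem.Dict.keys_modify,
              PySem.Dict.keys_insert_of_contains _ _ hka, ← PySem.Dict.contains_iff_mem_keys]
          exact h key (by simp [hk'])
        rw [ih _ hnd' hcont]
        rw [PySem.Dict.getD_modify]
        by_cases hk : k = a
        · subst hk
          simp [hanot, hm]
        · simp only [if_neg hk]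
          by_cases hkt : k ∈ t <;> simp [hkt, hk]
      · rw [if_neg hm]
        rw [ih _ hnd' (fun key hk' => h key (by simp [hk']))]
        by_cases hk : k = a
        · subst hk; simp [hanot, hm]
        · by_cases hkt : k ∈ t <;> simp [hkt, hk]

-- A's outer loop
lemma pvOuter (span : List Int) (d : PySem.Dict Int (List Int)) (hnd : d.keys.Nodup) :
    (span.foldl (fun d x =>
        (PySem.Dict.keys d).foldl (fun d key =>
          if PySem.Int.mod x key = 0 then d.modify key [] (fun v => v ++ [x]) else d) d) d).keys = d.keys ∧
    ∀ k, (span.foldl (fun d x =>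
        (PySem.Dict.keys d).foldl (fun d key =>
          if PySem.Int.mod x key = 0 then d.modify key [] (fun v => v ++ [x]) else d) d) d).getD k [] =
      d.getD k [] ++ (if k ∈ d.keys then span.filter (fun x => decide (PySem.Int.mod x k = 0)) else []) := by
  induction span generalizing d with
  | nil => simp
  | cons x t ih =>
      simp only [List.foldl_cons]
      have hcont : ∀ key ∈ d.keys, d.contains key = true := by
        intro key hk; rw [PySem.Dict.contains_iff_mem_keys]; exact hk
      have hkeys := pvInner_keys x d.keys d hcont
      have hget := pvInner_getD x d.keys d hnd hcont
      obtain ⟨ihk, ihg⟩ := ih _ (by rw [hkeys]; exact hnd)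
      constructor
      · rw [ihk, hkeys]
      · intro k
        rw [ihg k, hget k, hkeys]
        by_cases hk : k ∈ d.keys
        · by_cases hm : PySem.Int.mod x k = 0
          · simp [hk, hm, List.filter_cons]
          · simp [hk, hm, List.filter_cons]
        · simp [hk]

-- characterization of A
lemma pvA_char (divisors : List Int) (lower upper : Int) :
    create_divisors_dict divisors lower upper =
      (PySem.Set.ofList divisors).map (fun k =>
        (k, (PySem.List.pyRange lower (upper + 1) 1).filter (fun x => decide (PySem.Int.mod x k = 0)))) := by
  simp only [create_divisors_dict]
  set d0 : PySem.Dict Int (List Int) :=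
    divisors.foldl (fun d x => d.insert x ([] : List Int)) PySem.Dict.empty with hd0
  have hkeys0 : d0.keys = PySem.Set.ofList divisors := by
    rw [hd0, PySem.Dict.keys_foldl_insert divisors (fun _ _ => ([] : List Int)),
        PySem.Dict.keys_empty]
    rfl
  have hnd0 : d0.keys.Nodup := by
    rw [hd0]
    exact PySem.Dict.nodup_keys_foldl_insert divisors (fun _ _ => ([] : List Int)) _
      PySem.Dict.nodup_keys_empty
  have h0 : ∀ k, d0.getD k [] = [] := by
    intro k
    rw [hd0]
    exact pvInit_getD divisors PySem.Dict.empty (fun k' => PySem.Dict.getD_empty k' []) k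
  obtain ⟨hK, hG⟩ := pvOuter (PySem.List.pyRange lower (upper + 1) 1) d0 hnd0
  rw [PySem.Dict.items_eq_map_keys _ (by rw [hK]; exact hnd0) ([] : List Int), hK, hkeys0]
  apply List.map_congr_left
  intro k hk
  have hk' : k ∈ d0.keys := by rw [hkeys0]; exact hk
  rw [hG k, h0 k, if_pos hk']
  simp

-- characterization of B
lemma pvB_fold (divs : List Int) (lower upper : Int) (d : PySem.Dict Int (List Int))
    (hnd : d.keys.Nodup)
    (h : d.items = d.keys.map (fun k => (k, pvRangeOf lower upper k))) :
    (divs.foldl (fun res k =>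
        if res.contains k = false then
          res.insert k (PySem.List.pyRange (-(PySem.Int.floordiv (-lower) |k|) * |k|) (upper + 1) |k|)
        else res) d).items =
      (PySem.Set.update d.keys divs).map (fun k => (k, pvRangeOf lower upper k)) := by
  induction divs generalizing d with
  | nil => simpa [PySem.Set.update] using h
  | cons a t ih =>
      simp only [List.foldl_cons]
      have hupd : PySem.Set.update d.keys (a :: t) = PySem.Set.update (PySem.Set.add d.keys a) t := rfl
      rw [hupd]
      by_cases hc : d.contains a = true
      · rw [if_neg (by simp [hc])]
        have hmem : a ∈ d.keys := (PySem.Dict.contains_iff_mem_keys d a).mp hc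
        have hadd : PySem.Set.add d.keys a = d.keys := by
          simp [PySem.Set.add, PySem.Set.contains, hmem]
        rw [hadd]
        exact ih d hnd h
      · have hc' : d.contains a = false := by
          cases hcc : d.contains a
          · rfl
          · exact absurd hcc hc
        rw [if_pos (by simp [hc'])]
        have hanot : a ∉ d.keys := fun hm => hc ((PySem.Dict.contains_iff_mem_keys d a).mpr hm)
        have hadd : PySem.Set.add d.keys a = d.keys ++ [a] := by
          simp [PySem.Set.add, PySem.Set.contains, hanot]
        rw [hadd,
          ← PySem.Dict.keys_insert_of_not_contains d
            (PySem.List.pyRange (-(PySem.Int.floordiv (-lower) |a|) * |a|) (upper + 1) |a|) hc']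
        apply ih
        · rw [PySem.Dict.keys_insert_of_not_contains d _ hc']
          simp [List.nodup_append, hnd]
          exact fun x hx hxa => hanot (hxa ▸ hx)
        · rw [PySem.Dict.items_insert_of_not_contains d _ hc',
              PySem.Dict.keys_insert_of_not_contains d _ hc', h, List.map_append]
          rfl

lemma pvB_char (divisors : List Int) (lower upper : Int) :
    create_divisors_dict_alt divisors lower upper =
      (PySem.Set.ofList divisors).map (fun k => (k, pvRangeOf lower upper k)) := by
  simp only [create_divisors_dict_alt]
  rw [pvB_fold divisors lower upper PySem.Dict.empty PySem.Dict.nodup_keys_empty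
      (by rw [PySem.Dict.keys_empty]; rfl), PySem.Dict.keys_empty]
  rfl

-- arithmetic core: the multiples of s in [lo, up] are exactly B's stepped range
lemma pvFilter_eq_range (s lo up : Int) (hs : 0 < s) :
    (PySem.List.pyRange lo (up + 1) 1).filter (fun x => decide (s ∣ x)) =
      PySem.List.pyRange (-(PySem.Int.floordiv (-lo) s) * s) (up + 1) s := by
  have hq := (PySem.Int.neg_floordiv_neg_eq_iff_of_pos (a := lo) hs
    (q := -(PySem.Int.floordiv (-lo) s))).mp rfl
  set q : Int := -(PySem.Int.floordiv (-lo) s) with hqdef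
  set m : Int := q * s with hmdef
  have hlom : lo ≤ m := hq.2
  have hmlo : m - s < lo := by
    have := hq.1
    nlinarith [hq.1]
  have hsm : s ∣ m := dvd_mul_left s q
  -- both sides are strictly increasing
  have hpw : ∀ (a b step : Int), 0 < step → (PySem.List.pyRange a b step).Pairwise (· < ·) := by
    intro a b step hstep
    rw [PySem.List.pyRange_of_pos a b hstep]
    exact List.Pairwise.map _
      (fun i j hij => by
        have : (i : Int) < (j : Int) := by exact_mod_cast hij
        nlinarith)
      List.pairwise_lt_range
  have hpw1 : ((PySem.List.pyRange lo (up + 1) 1).filter (fun x => decide (s ∣ x))).Pairwise (· < ·) :=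
    (hpw lo (up + 1) 1 one_pos).filter _
  have hpw2 : (PySem.List.pyRange m (up + 1) s).Pairwise (· < ·) := hpw m (up + 1) s hs
  have hnd1 : ((PySem.List.pyRange lo (up + 1) 1).filter (fun x => decide (s ∣ x))).Nodup :=
    hpw1.imp ne_of_lt
  have hnd2 : (PySem.List.pyRange m (up + 1) s).Nodup := hpw2.imp ne_of_lt
  -- same members
  have hmem : ∀ x, x ∈ (PySem.List.pyRange lo (up + 1) 1).filter (fun x => decide (s ∣ x)) ↔
      x ∈ PySem.List.pyRange m (up + 1) s := by
    intro x
    rw [List.mem_filter, PySem.List.mem_pyRange_iff_of_pos one_pos,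
        PySem.List.mem_pyRange_iff_of_pos hs]
    simp only [decide_eq_true_eq]
    constructor
    · rintro ⟨⟨hlx, hxu, -⟩, hdx⟩
      refine ⟨?_, hxu, (dvd_sub_right hdx).mpr hsm⟩
      by_contra hxm
      push Not at hxm
      obtain ⟨c, hc⟩ := dvd_sub hsm hdx
      have hc0 : 0 < c := by nlinarith
      have hc1 : (1 : Int) ≤ c := by omega
      have hsc : s * 1 ≤ s * c := mul_le_mul_of_nonneg_left hc1 hs.le
      linarith
    · rintro ⟨hmx, hxu, hdxm⟩
      refine ⟨⟨le_trans hlom hmx, hxu, one_dvd _⟩, ?_⟩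
      obtain ⟨c, hc⟩ := hdxm
      exact ⟨q + c, by rw [hmdef] at hc; linear_combination hc⟩
  -- two strictly increasing lists with the same members are equal
  exact List.Perm.eq_of_pairwise
    (fun a b _ _ h1 h2 => absurd h2 (lt_asymm h1)) hpw1 hpw2
    ((List.perm_ext_iff_of_nodup hnd1 hnd2).mpr hmem)

-- ===== VERDICT (by name: the statement is the Claim_ definition above) =====
theorem create_divisors_dict_spec : Claim_equal_create_divisors_dict := by
  intro divisors lower upper _ hpre
  unfold Spec_create_divisors_dict
  rw [pvA_char, pvB_char]
  apply List.map_congr_left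
  intro k hk
  have hk0 : k ≠ 0 := by
    intro h
    subst h
    exact hpre ((PySem.Set.mem_ofList divisors 0).mp hk)
  have hs : (0 : Int) < |k| := abs_pos.mpr hk0
  have hfr := pvFilter_eq_range |k| lower upper hs
  unfold pvRangeOf
  rw [← hfr]
  congr 1
  apply List.filter_congr
  intro x hx
  simp only [decide_eq_decide]
  rw [PySem.Int.mod_eq_zero_iff_dvd, ← abs_dvd]
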